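-- pv_equiv track=rewrite | github.com/Jiawei-Wang/Sudoku-Solver | v0.3/sudoku-solver-backjumping.py | judge_unique
-- ===== SOURCE A (Python) =====
-- def judge_unique(lis):
--     n = []
--     for i in lis:
--         if i != 0:
--             n.append(i)
--     if len(n) != len(set(n)):
--         return False
--     return True
-- ===== SOURCE B (Python) =====
-- def judge_unique(lis):
--     seen = set()
--     for i in lis:
--         if i == 0:
--             continue
--         if i in seen:
--             return False
--         seen.add(i)
--     return True
-- ===== Notes on version B (the rewrite author's own statement) =====
-- stated objective: simpler
-- what changed: Single pass maintaining one set with an early False on the first repeated nonzero element, instead of building a filtered list and then comparing its length with the length of its set.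
import Mathlib
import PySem

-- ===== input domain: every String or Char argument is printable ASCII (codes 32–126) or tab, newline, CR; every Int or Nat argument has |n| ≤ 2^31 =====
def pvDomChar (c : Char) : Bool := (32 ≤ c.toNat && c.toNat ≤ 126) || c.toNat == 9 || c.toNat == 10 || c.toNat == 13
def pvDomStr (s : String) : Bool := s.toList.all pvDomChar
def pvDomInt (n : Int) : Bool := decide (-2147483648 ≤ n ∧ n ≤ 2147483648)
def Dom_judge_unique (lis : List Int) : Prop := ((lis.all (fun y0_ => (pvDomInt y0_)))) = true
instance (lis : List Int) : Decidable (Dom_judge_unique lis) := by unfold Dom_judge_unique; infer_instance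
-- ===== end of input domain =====

-- B is a single pass with one `seen` set and an early exit, instead of A's build-filtered-list then
-- compare its length to its set's length; same O(n) cost, simpler decomposition.

-- ===== PORT A =====
def judge_unique (lis : List Int) : Bool :=
  let n : List Int := lis.foldl (fun acc i => if i ≠ 0 then acc ++ [i] else acc) []
  if n.length ≠ PySem.Set.len (PySem.Set.ofList n) then false else true

-- ===== PORT B =====
def judgeUniqueGo (seen : PySem.Set Int) : List Int → Bool
  | [] => true
  | i :: rest =>
      if i = 0 then judgeUniqueGo seen rest
      else if PySem.Set.contains seen i then false
      else judgeUniqueGo (PySem.Set.add seen i) rest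

def judge_unique_alt (lis : List Int) : Bool := judgeUniqueGo PySem.Set.empty lis

-- ===== PRECONDITION & SPEC =====
def Spec_judge_unique (lis : List Int) (out : Bool) : Prop := out = judge_unique_alt lis
instance (lis : List Int) (out : Bool) : Decidable (Spec_judge_unique lis out) := by unfold Spec_judge_unique; infer_instance

-- ===== CLAIM (what is proved, stated in full; the proofs are below) =====
def Claim_equal_judge_unique : Prop := ∀ (lis : List Int), Dom_judge_unique lis → Spec_judge_unique lis (judge_unique lis)

-- ===== LEMMAS AND PROOFS =====

theorem pv_foldl_filter (lis : List Int) (acc : List Int) :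
    lis.foldl (fun acc i => if i ≠ 0 then acc ++ [i] else acc) acc
      = acc ++ lis.filter (fun i => !decide (i = 0)) := by
  induction lis generalizing acc with
  | nil => simp
  | cons x xs ih =>
      rw [List.foldl_cons, ih, List.filter_cons]
      by_cases h : x = 0 <;> simp [h, List.append_assoc]

theorem pv_contains_decide (s : List Int) (x : Int) :
    PySem.Set.contains s x = decide (x ∈ s) := by
  by_cases h : x ∈ s <;> simp [h, PySem.Set.contains_iff]

theorem pv_ofList_concat (xs : List Int) (x : Int) :
    PySem.Set.ofList (xs ++ [x]) = PySem.Set.add (PySem.Set.ofList xs) x := by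
  simp [PySem.Set.ofList_eq_foldl, List.foldl_append]

theorem pv_add_mem (s : List Int) (x : Int) (h : x ∈ s) :
    PySem.Set.add s x = s := by
  unfold PySem.Set.add; rw [pv_contains_decide]; simp [h]

theorem pv_add_not_mem (s : List Int) (x : Int) (h : x ∉ s) :
    PySem.Set.add s x = s ++ [x] := by
  unfold PySem.Set.add; rw [pv_contains_decide]; simp [h]

theorem pv_ofList_len_le (n : List Int) : (PySem.Set.ofList n).length ≤ n.length := by
  induction n using List.reverseRecOn with
  | nil => simp [PySem.Set.ofList]
  | append_singleton xs x ih =>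
      rw [pv_ofList_concat]
      by_cases hx : x ∈ PySem.Set.ofList xs
      · rw [pv_add_mem _ _ hx]; simp; omega
      · rw [pv_add_not_mem _ _ hx]; simp; omega

theorem pv_ofList_len_eq_iff (n : List Int) :
    (PySem.Set.ofList n).length = n.length ↔ n.Nodup := by
  induction n using List.reverseRecOn with
  | nil => simp [PySem.Set.ofList]
  | append_singleton xs x ih =>
      have hle := pv_ofList_len_le xs
      rw [pv_ofList_concat]
      by_cases hx : x ∈ xs
      · have hx' : x ∈ PySem.Set.ofList xs := (PySem.Set.mem_ofList xs x).mpr hx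
        rw [pv_add_mem _ _ hx']
        constructor
        · intro h; exfalso; simp at h; omega
        · intro h
          exact absurd hx ((List.disjoint_of_nodup_append h) · (by simp))
      · have hx' : x ∉ PySem.Set.ofList xs := fun h => hx ((PySem.Set.mem_ofList xs x).mp h)
        rw [pv_add_not_mem _ _ hx']
        have hnd : (xs ++ [x]).Nodup ↔ xs.Nodup := by
          rw [List.nodup_append]
          refine ⟨fun h => h.1, fun h1 => ⟨h1, by simp, ?_⟩⟩
          intro a ha b hb e
          exact hx ((e.trans (List.mem_singleton.mp hb)) ▸ ha)
        rw [hnd, ← ih]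
        simp

theorem pv_go_spec (lis : List Int) (seen : List Int) (hs : seen.Nodup) :
    judgeUniqueGo seen lis = decide ((seen ++ lis.filter (fun i => !decide (i = 0))).Nodup) := by
  induction lis generalizing seen with
  | nil => simp [judgeUniqueGo, hs]
  | cons x xs ih =>
      by_cases h0 : x = 0
      · simp only [judgeUniqueGo, if_pos h0, List.filter_cons, h0]
        simpa using ih seen hs
      · have hf : List.filter (fun i => !decide (i = 0)) (x :: xs)
            = x :: List.filter (fun i => !decide (i = 0)) xs := by
          simp [List.filter_cons, h0]
        rw [hf]
        simp only [judgeUniqueGo, if_neg h0, pv_contains_decide]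
        by_cases hx : x ∈ seen
        · have hnd : ¬ (seen ++ x :: List.filter (fun i => !decide (i = 0)) xs).Nodup :=
            fun h => (List.disjoint_of_nodup_append h) hx (by simp)
          simp [hx, hnd]
        · have hseen : (seen ++ [x]).Nodup := by
            rw [List.nodup_append]
            simp [hs, hx]
            intro a ha e; exact hx (e ▸ ha)
          rw [if_neg (by simp [hx]), pv_add_not_mem _ _ hx, ih _ hseen]
          simp [List.append_assoc]

-- ===== VERDICT (by name: the statement is the Claim_ definition above) =====
theorem judge_unique_spec : Claim_equal_judge_unique := by
  intro lis _
  show judge_unique lis = judge_unique_alt lis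
  unfold judge_unique judge_unique_alt
  rw [pv_foldl_filter, List.nil_append,
      pv_go_spec _ PySem.Set.empty (by simp [PySem.Set.empty]), PySem.Set.empty,
      List.nil_append]
  simp only [PySem.Set.len]
  by_cases h : (lis.filter (fun i => !decide (i = 0))).Nodup
  · have he := (pv_ofList_len_eq_iff (lis.filter (fun i => !decide (i = 0)))).mpr h
    simp [h, he]
  · have hne : (lis.filter (fun i => !decide (i = 0))).length
        ≠ (PySem.Set.ofList (lis.filter (fun i => !decide (i = 0)))).length :=
      fun e => h ((pv_ofList_len_eq_iff _).mp e.symm)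
    simp [h, hne]
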